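-- pv_equiv track=rewrite | github.com/EddyFakhry/Cloud_Based_Gala_Management | lib/hy3file.py | checksum
-- ===== SOURCE A (Python) =====
-- def checksum(line):
--     odd = 0
--     even = 0
--     for i in range(0, len(line)):
--         if i % 2 == 1:
--             odd += ord(line[i]) * 2 #sum value of all characters with an odd index and multiply by 2
--         else:
--             even += ord(line[i])    #sum value of all characters with an even index
--     total = (odd + even)            #add the two sums
--     raw = (total // 21) + 205       #integer division of addition and add 205
--     return str(raw)[-1] + str(raw)[-2] #reverse last two digits of prior operation
-- ===== SOURCE B (Python) =====
-- def checksum(line):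
--     even = sum(ord(c) for c in line[::2])
--     odd = 2 * sum(ord(c) for c in line[1::2])
--     raw = (even + odd) // 21 + 205
--     return str(raw % 10) + str(raw // 10 % 10)
-- ===== Notes on version B (the rewrite author's own statement) =====
-- stated objective: simpler
-- what changed: Replaces the indexed loop with a per-element parity branch by two sums over the disjoint slices line[::2] and line[1::2], and extracts the last two digits arithmetically (raw % 10, raw // 10 % 10) instead of indexing into str(raw).
import Mathlib
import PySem

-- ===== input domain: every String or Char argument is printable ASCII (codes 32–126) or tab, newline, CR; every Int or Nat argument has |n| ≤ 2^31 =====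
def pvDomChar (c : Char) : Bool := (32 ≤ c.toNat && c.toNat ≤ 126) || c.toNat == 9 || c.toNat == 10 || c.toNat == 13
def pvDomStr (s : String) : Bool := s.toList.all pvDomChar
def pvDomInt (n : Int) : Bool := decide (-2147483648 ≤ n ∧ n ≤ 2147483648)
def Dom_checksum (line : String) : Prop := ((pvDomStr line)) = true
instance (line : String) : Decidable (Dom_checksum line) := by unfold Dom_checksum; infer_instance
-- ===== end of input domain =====

-- B sums the two disjoint slices line[::2] and line[1::2] and extracts the last two digits of raw
-- arithmetically instead of indexing into str(raw); objective: simpler (same O(n) cost).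

-- ===== PORT A =====
-- the indexed loop 'for i in range(0, len(line))' with its parity branch, as a foldl over the range
def checksum (line : String) : String :=
  let cs := line.toList
  let oe :=
    (PySem.List.pyRange 0 (cs.length : Int) 1).foldl
      (fun (oe : Int × Int) i =>
        if PySem.Int.mod i 2 = 1 then
          (oe.1 + ((PySem.List.pyGetD cs i ' ').toNat : Int) * 2, oe.2)
        else
          (oe.1, oe.2 + ((PySem.List.pyGetD cs i ' ').toNat : Int)))
      (0, 0)
  let total := oe.1 + oe.2
  let raw := PySem.Int.floordiv total 21 + 205
  let s := PySem.Int.toStr raw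
  -- str(raw)[-1] + str(raw)[-2]; raw ≥ 205 so both indices are in range (none is unreachable)
  match PySem.Str.pyGet? s (-1), PySem.Str.pyGet? s (-2) with
  | some c1, some c2 => String.ofList [c1, c2]
  | _, _ => ""

-- ===== PORT B =====
def checksum_alt (line : String) : String :=
  let evens := (PySem.Str.slice? line none none 2).getD ""
  let odds := (PySem.Str.slice? line (some 1) none 2).getD ""
  let even : Int := (evens.toList.map (fun c => (c.toNat : Int))).sum
  let odd : Int := 2 * (odds.toList.map (fun c => (c.toNat : Int))).sum
  let raw := PySem.Int.floordiv (even + odd) 21 + 205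
  PySem.Int.toStr (PySem.Int.mod raw 10) ++ PySem.Int.toStr (PySem.Int.mod (PySem.Int.floordiv raw 10) 10)

-- ===== PRECONDITION & SPEC =====
def Spec_checksum (line : String) (out : String) : Prop := out = checksum_alt line
instance (line : String) (out : String) : Decidable (Spec_checksum line out) := by unfold Spec_checksum; infer_instance

-- ===== CLAIM (what is proved, stated in full; the proofs are below) =====
def Claim_equal_checksum : Prop := ∀ (line : String), Dom_checksum line → Spec_checksum line (checksum line)

-- ===== LEMMAS AND PROOFS =====

-- even-index elements of a list
def pvEvens {α : Type} : List α → List α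
  | [] => []
  | [a] => [a]
  | a :: _ :: t => a :: pvEvens t

-- sum of character codes at even indices
def pvSe (cs : List Char) : Int := ((pvEvens cs).map (fun c => (c.toNat : Int))).sum

lemma pvSe_cons (a : Char) (t : List Char) : pvSe (a :: t) = (a.toNat : Int) + pvSe t.tail := by
  cases t <;> simp [pvSe, pvEvens]

lemma pvSe_nonneg (cs : List Char) : 0 ≤ pvSe cs := by
  unfold pvSe
  refine List.sum_nonneg ?_
  intro x hx
  simp only [List.mem_map] at hx
  obtain ⟨c, _, rfl⟩ := hx
  positivity

-- A's loop: the fold over the index range with its parity branch computes the two parity-class sums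
lemma pvFoldA (cs : List Char) : ∀ (j : Nat) (o e : Int),
    ((List.range cs.length).foldl
      (fun (oe : Int × Int) k =>
        if ((j + k) % 2 = 1) then (oe.1 + ((cs.getD k ' ').toNat : Int) * 2, oe.2)
        else (oe.1, oe.2 + ((cs.getD k ' ').toNat : Int))) (o, e))
    = if j % 2 = 0 then (o + 2 * pvSe cs.tail, e + pvSe cs) else (o + 2 * pvSe cs, e + pvSe cs.tail) := by
  induction cs with
  | nil =>
    intro j o e
    rcases Nat.mod_two_eq_zero_or_one j with hj | hj <;> simp [pvSe, pvEvens, hj]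
  | cons a t ih =>
    intro j o e
    simp only [List.length_cons, List.range_succ_eq_map, List.foldl_cons, List.foldl_map]
    have hfun : (fun (oe : Int × Int) (k : Nat) =>
          if ((j + Nat.succ k) % 2 = 1) then (oe.1 + (((a::t).getD (Nat.succ k) ' ').toNat : Int) * 2, oe.2)
          else (oe.1, oe.2 + (((a::t).getD (Nat.succ k) ' ').toNat : Int)))
        = (fun (oe : Int × Int) (k : Nat) =>
          if (((j+1) + k) % 2 = 1) then (oe.1 + ((t.getD k ' ').toNat : Int) * 2, oe.2)
          else (oe.1, oe.2 + ((t.getD k ' ').toNat : Int))) := by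
      funext oe k
      have h1 : j + Nat.succ k = (j + 1) + k := by omega
      simp [h1]
    rw [hfun, ih (j+1)]
    by_cases hj : j % 2 = 0
    · have hj1 : ¬ ((j + 0) % 2 = 1) := by omega
      have hj2 : ¬ ((j + 1) % 2 = 0) := by omega
      rw [if_neg hj1, if_pos hj, if_neg hj2, pvSe_cons]
      simp only [List.getD_cons_zero, List.tail_cons, Prod.mk.injEq]
      refine ⟨?_, ?_⟩ <;> first | trivial | ring
    · have hj1 : (j + 0) % 2 = 1 := by omega
      have hj2 : (j + 1) % 2 = 0 := by omega
      rw [if_pos hj1, if_neg hj, if_pos hj2, pvSe_cons]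
      simp only [List.getD_cons_zero, List.tail_cons, Prod.mk.injEq]
      refine ⟨?_, ?_⟩ <;> first | trivial | ring

-- s[::2] is the even-index elements
lemma pvSlice_two {α : Type} (cs : List α) : PySem.List.slice? cs none none 2 = some (pvEvens cs) := by
  induction cs using pvEvens.induct with
  | case1 => simp [PySem.List.slice?, PySem.List.sliceIndices, pvEvens]
  | case2 a => simp [PySem.List.slice?, PySem.List.sliceIndices, pvEvens]
  | case3 a b t ih =>
    simp only [PySem.List.slice?, PySem.List.sliceIndices, pvEvens] at ih ⊢
    norm_num at ih ⊢
    have hc : (if (0:Int) ≤ (t.length:Int) + 1 then (((t.length:Int) + 1 + 1 + 2 - 1) / 2).toNat else 0)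
        = (if 0 < t.length then (((t.length:Int) + 2 - 1) / 2).toNat else 0) + 1 := by
      split_ifs <;> omega
    rw [hc, List.range_succ_eq_map, List.filterMap_cons, List.filterMap_map]
    have hf : ((fun x : Nat => (a :: b :: t)[(2 * (x:Int)).toNat]?) ∘ Nat.succ)
        = (fun x : Nat => t[(2 * (x:Int)).toNat]?) := by
      funext x
      have h1 : (2 * ((x:Int) + 1)).toNat = 2 * x + 2 := by omega
      have h2 : (2 * (x:Int)).toNat = 2 * x := by omega
      simp [Function.comp, h1, h2]
    rw [hf, ih]
    simp

-- s[1::2] is the even-index elements of the tail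
lemma pvSlice_two_one {α : Type} (cs : List α) :
    PySem.List.slice? cs (some 1) none 2 = some (pvEvens cs.tail) := by
  cases cs with
  | nil => simp [PySem.List.slice?, PySem.List.sliceIndices, pvEvens]
  | cons a t =>
    simp only [List.tail_cons]
    rw [← pvSlice_two t]
    simp only [PySem.List.slice?, PySem.List.sliceIndices]
    norm_num
    have hf : (fun k : Nat => (a :: t)[(1 + 2 * (k:Int)).toNat]?) = (fun k : Nat => t[(2 * (k:Int)).toNat]?) := by
      funext k
      have h1 : (1 + 2 * (k:Int)).toNat = 2 * k + 1 := by omega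
      have h2 : (2 * (k:Int)).toNat = 2 * k := by omega
      simp [h1, h2]
    rw [hf]

-- accumulator lemma for Nat.toDigitsCore
lemma pvCoreAcc (b : Nat) : ∀ (f n : Nat) (l : List Char),
    Nat.toDigitsCore b f n l = Nat.toDigitsCore b f n [] ++ l := by
  intro f
  induction f with
  | zero => intro n l; simp [Nat.toDigitsCore]
  | succ f ih =>
    intro n l
    simp only [Nat.toDigitsCore]
    by_cases h : n / b = 0
    · simp [h]
    · simp only [if_neg h]
      rw [ih (n / b) ((n % b).digitChar :: l), ih (n / b) [(n % b).digitChar]]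
      simp

-- fuel irrelevance for Nat.toDigitsCore
lemma pvCoreFuel (n : Nat) : ∀ (f f' : Nat), n < f → n < f' →
    Nat.toDigitsCore 10 f n [] = Nat.toDigitsCore 10 f' n [] := by
  induction n using Nat.strong_induction_on with
  | _ n ih =>
    intro f f' hf hf'
    obtain ⟨g, rfl⟩ : ∃ g, f = g + 1 := ⟨f - 1, by omega⟩
    obtain ⟨g', rfl⟩ : ∃ g', f' = g' + 1 := ⟨f' - 1, by omega⟩
    simp only [Nat.toDigitsCore]
    by_cases h : n / 10 = 0
    · simp [h]
    · simp only [if_neg h]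
      have hlt : n / 10 < n := Nat.div_lt_self (by omega) (by omega)
      rw [pvCoreAcc 10 g, pvCoreAcc 10 g', ih (n/10) hlt g g' (by omega) (by omega)]

-- the decimal digits of m ≥ 10 end with its last digit
lemma pvToDigits_step (m : Nat) (h : 10 ≤ m) :
    Nat.toDigits 10 m = Nat.toDigits 10 (m / 10) ++ [Nat.digitChar (m % 10)] := by
  have h0 : m / 10 ≠ 0 := by
    intro h'
    have := Nat.lt_of_div_eq_zero (by omega) h'
    omega
  conv_lhs => rw [show Nat.toDigits 10 m = Nat.toDigitsCore 10 m (m/10) [(m%10).digitChar] from by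
    simp [Nat.toDigits, Nat.toDigitsCore, h0]]
  rw [pvCoreAcc 10 m, pvCoreFuel (m/10) m (m/10 + 1) (by omega) (by omega)]
  rfl

lemma pvToDigits_small (m : Nat) (h : m < 10) :
    Nat.toDigits 10 m = [Nat.digitChar m] := by
  have h0 : m / 10 = 0 := Nat.div_eq_of_lt h
  simp [Nat.toDigits, Nat.toDigitsCore, h0, Nat.mod_eq_of_lt h]

lemma pvToChars_nat (m : Nat) : PySem.Int.toChars (m : Int) = Nat.toDigits 10 m := by
  simp [PySem.Int.toChars]

-- A's tail expression str(raw)[-1]+str(raw)[-2] equals B's arithmetic digit extraction for raw ≥ 100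
lemma pvDigits_final (r : Int) (h : 100 ≤ r) :
    (match PySem.Str.pyGet? (PySem.Int.toStr r) (-1), PySem.Str.pyGet? (PySem.Int.toStr r) (-2) with
     | some c1, some c2 => String.ofList [c1, c2]
     | _, _ => "")
    = PySem.Int.toStr (PySem.Int.mod r 10) ++ PySem.Int.toStr (PySem.Int.mod (PySem.Int.floordiv r 10) 10) := by
  lift r to Nat using (by omega) with m
  have hm : 100 ≤ m := by exact_mod_cast h
  have h10 : 10 ≤ m / 10 := Nat.le_div_iff_mul_le (by omega) |>.mpr (by omega)
  have hd : (PySem.Int.toStr (m : Int)).toList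
      = (Nat.toDigits 10 (m / 10 / 10) ++ [Nat.digitChar (m / 10 % 10)]) ++ [Nat.digitChar (m % 10)] := by
    rw [PySem.Int.toList_toStr, pvToChars_nat, pvToDigits_step m (by omega), pvToDigits_step (m/10) h10]
  have hget1 : PySem.Str.pyGet? (PySem.Int.toStr (m : Int)) (-1) = some (Nat.digitChar (m % 10)) := by
    rw [PySem.Str.pyGet?_eq, hd]
    exact PySem.List.pyGet?_neg_one_append_singleton _ _
  have hget2 : PySem.Str.pyGet? (PySem.Int.toStr (m : Int)) (-2) = some (Nat.digitChar (m / 10 % 10)) := by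
    rw [PySem.Str.pyGet?_eq, hd]
    have hassoc : (Nat.toDigits 10 (m / 10 / 10) ++ [Nat.digitChar (m / 10 % 10)]) ++ [Nat.digitChar (m % 10)]
        = Nat.toDigits 10 (m / 10 / 10) ++ [Nat.digitChar (m / 10 % 10), Nat.digitChar (m % 10)] := by
      simp
    rw [hassoc, PySem.Chars.pyGet?_eq_listPyGet?, PySem.List.pyGet?_neg_ofNat _ 2 (by omega) (by simp)]
    simp
  rw [hget1, hget2]
  have hmod : PySem.Int.mod (m : Int) 10 = ((m % 10 : Nat) : Int) := by
    have := PySem.Int.mod_natCast m 10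
    exact_mod_cast this
  have hfd : PySem.Int.floordiv (m : Int) 10 = ((m / 10 : Nat) : Int) := by
    have := PySem.Int.floordiv_natCast m 10
    exact_mod_cast this
  have hmod2 : PySem.Int.mod ((m / 10 : Nat) : Int) 10 = ((m / 10 % 10 : Nat) : Int) := by
    have := PySem.Int.mod_natCast (m / 10) 10
    exact_mod_cast this
  rw [hmod, hfd, hmod2]
  apply String.toList_inj.mp
  simp only [PySem.Int.toStr, String.toList_append, String.toList_ofList,
    pvToChars_nat, pvToDigits_small _ (Nat.mod_lt _ (by omega)), List.cons_append, List.nil_append]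
-- ===== VERDICT (by name: the statement is the Claim_ definition above) =====
theorem checksum_spec : Claim_equal_checksum := by
  unfold Claim_equal_checksum Spec_checksum
  intro line _
  unfold checksum checksum_alt
  simp only [PySem.List.pyRange_zero_nat, List.foldl_map]
  have hfun : (fun (oe : Int × Int) (k : Nat) =>
        if PySem.Int.mod (k : Int) 2 = 1 then
          (oe.1 + ((PySem.List.pyGetD line.toList (k : Int) ' ').toNat : Int) * 2, oe.2)
        else (oe.1, oe.2 + ((PySem.List.pyGetD line.toList (k : Int) ' ').toNat : Int)))
      = (fun (oe : Int × Int) (k : Nat) =>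
        if ((0 + k) % 2 = 1) then (oe.1 + ((line.toList.getD k ' ').toNat : Int) * 2, oe.2)
        else (oe.1, oe.2 + ((line.toList.getD k ' ').toNat : Int))) := by
    funext oe k
    rw [PySem.Int.mod_eq_emod_of_pos (by norm_num)]
    have hcond : ((k : Int) % 2 = 1) ↔ ((0 + k) % 2 = 1) := by omega
    simp [PySem.List.pyGetD_natCast, hcond]
  rw [hfun, pvFoldA line.toList 0 0 0]
  have hev : (PySem.Str.slice? line none none 2).getD "" = String.ofList (pvEvens line.toList) := by
    simp [PySem.Str.slice?, PySem.Chars.slice?, pvSlice_two]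
  have hodd : (PySem.Str.slice? line (some 1) none 2).getD "" = String.ofList (pvEvens line.toList.tail) := by
    simp [PySem.Str.slice?, PySem.Chars.slice?, pvSlice_two_one]
  rw [hev, hodd]
  simp only [String.toList_ofList]
  have hsum : ∀ l : List Char, (List.map (fun c => ((c.toNat : Int))) (pvEvens l)).sum = pvSe l :=
    fun l => rfl
  rw [hsum, hsum]
  have hco : (0 + 2 * pvSe line.toList.tail) + (0 + pvSe line.toList)
      = pvSe line.toList + 2 * pvSe line.toList.tail := by ring
  simp only [if_true]
  rw [hco]
  apply pvDigits_final
  have h1 := pvSe_nonneg line.toList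
  have h2 := pvSe_nonneg line.toList.tail
  rw [PySem.Int.floordiv_eq_ediv_of_pos (by norm_num)]
  have := Int.ediv_nonneg (by omega : (0:Int) ≤ pvSe line.toList + 2 * pvSe line.toList.tail) (by norm_num : (0:Int) ≤ 21)
  omega
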